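-- pv_equiv track=rewrite | github.com/diGiusepp3/webcrafters-studio | backend/services/preview_service.py | _detect_python_flavor
-- ===== SOURCE A (Python) =====
-- from typing import Any, Dict, List, Optional, Tuple
--
-- def _detect_python_flavor(paths_lower: List[str]) -> Optional[str]:
--     if any(p.endswith("pyproject.toml") for p in paths_lower):
--         return "python"
--     if any(p.endswith("requirements.txt") for p in paths_lower):
--         return "python"
--     if any(p.endswith(".py") for p in paths_lower):
--         return "python"
--     return None
-- ===== SOURCE B (Python) =====
-- from typing import List, Optional
--
-- def _detect_python_flavor(paths_lower: List[str]) -> Optional[str]: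
--     for p in paths_lower:
--         if p.endswith(("pyproject.toml", "requirements.txt", ".py")):
--             return "python"
--     return None
-- ===== Notes on version B (the rewrite author's own statement) =====
-- stated objective: simpler
-- what changed: Three separate any() scans over the list are replaced by a single early-returning pass that tests each path once against a tuple of suffixes via str.endswith.
import Mathlib
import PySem

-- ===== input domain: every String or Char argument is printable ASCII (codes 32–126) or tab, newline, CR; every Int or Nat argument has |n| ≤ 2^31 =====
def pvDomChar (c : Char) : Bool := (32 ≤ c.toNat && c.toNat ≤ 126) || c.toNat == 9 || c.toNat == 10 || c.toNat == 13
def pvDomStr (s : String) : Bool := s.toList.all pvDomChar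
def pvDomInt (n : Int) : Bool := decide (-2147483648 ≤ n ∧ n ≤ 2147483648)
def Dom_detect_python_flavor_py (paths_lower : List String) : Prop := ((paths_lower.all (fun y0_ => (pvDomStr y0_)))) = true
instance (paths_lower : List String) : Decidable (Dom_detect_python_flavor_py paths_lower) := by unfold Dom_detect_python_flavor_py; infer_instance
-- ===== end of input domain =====

-- B replaces A's three separate any() scans with one early-returning pass testing each path against all three suffixes (simpler).


-- ===== PORT A =====
def detect_python_flavor_py (paths_lower : List String) : Option String :=
  if paths_lower.any (fun p => PySem.Str.endswith p "pyproject.toml") then some "python"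
  else if paths_lower.any (fun p => PySem.Str.endswith p "requirements.txt") then some "python"
  else if paths_lower.any (fun p => PySem.Str.endswith p ".py") then some "python"
  else none

-- ===== PORT B =====
def detect_python_flavor_py_alt : List String → Option String
  | [] => none
  | p :: rest =>
    if PySem.Str.endswith p "pyproject.toml" || PySem.Str.endswith p "requirements.txt"
        || PySem.Str.endswith p ".py" then
      some "python"
    else
      detect_python_flavor_py_alt rest

-- ===== PRECONDITION & SPEC =====
def Spec_detect_python_flavor_py (paths_lower : List String) (out : Option String) : Prop := out = detect_python_flavor_py_alt paths_lower
instance (paths_lower : List String) (out : Option String) : Decidable (Spec_detect_python_flavor_py paths_lower out) := by unfold Spec_detect_python_flavor_py; infer_instance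

-- ===== CLAIM (what is proved, stated in full; the proofs are below) =====
def Claim_equal_detect_python_flavor_py : Prop := ∀ (paths_lower : List String), Dom_detect_python_flavor_py paths_lower → Spec_detect_python_flavor_py paths_lower (detect_python_flavor_py paths_lower)

-- ===== LEMMAS AND PROOFS =====

-- any distributes over a pointwise triple disjunction
theorem any_or3 {a : Type} (f g h : a -> Bool) (xs : List a) :
    xs.any (fun p => f p || g p || h p) = (xs.any f || xs.any g || xs.any h) := by
  induction xs with
  | nil => simp
  | cons x t ih =>
    simp only [List.any_cons, ih]
    cases f x <;> cases g x <;> cases h x <;> simp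

-- B's single pass decides the disjunction of the three suffix tests.
theorem alt_eq_any (xs : List String) :
    detect_python_flavor_py_alt xs =
      if xs.any (fun p => PySem.Str.endswith p "pyproject.toml"
          || PySem.Str.endswith p "requirements.txt" || PySem.Str.endswith p ".py") then
        some "python"
      else none := by
  induction xs with
  | nil => rfl
  | cons p rest ih =>
    rw [detect_python_flavor_py_alt, List.any_cons]
    cases hb : (PySem.Str.endswith p "pyproject.toml" || PySem.Str.endswith p "requirements.txt"
        || PySem.Str.endswith p ".py") with
    | true => simp
    | false => simp [ih]

-- ===== VERDICT (by name: the statement is the Claim_ definition above) =====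
theorem detect_python_flavor_py_spec : Claim_equal_detect_python_flavor_py := by
  intro xs _
  unfold Spec_detect_python_flavor_py detect_python_flavor_py
  rw [alt_eq_any, any_or3]
  cases xs.any (fun p => PySem.Str.endswith p "pyproject.toml") <;>
    cases xs.any (fun p => PySem.Str.endswith p "requirements.txt") <;>
      cases xs.any (fun p => PySem.Str.endswith p ".py") <;> simp
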